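-- pv_equiv track=rewrite | github.com/fandreuz/matrix-rotation | src/rotation.py | compute_old_position
-- ===== SOURCE A (Python) =====
-- def compute_ring(rows_count: int, cols_count: int, row: int, col: int) -> int:
--     """
--     Compute the matrix ring (i.e. distance from the border) of the given
--     `row`/`col` pair.
--     """
--     return min(row, col, rows_count - 1 - row, cols_count - 1 - col)
--
-- def compute_ring_size(rows_count: int, cols_count: int, ring: int) -> int:
--     """
--     Compute the size of the given ring in terms of matrix cells.
--     """
--     if rows_count == 1:
--         return cols_count
--     if cols_count == 1:
--         return rows_count
--     return (rows_count - 2 * ring) * 2 + (cols_count - 2 * ring - 2) * 2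
--
-- def go_left(rotation: int, col: int, ring: int) -> tuple[int, int]:
--     """
--     Update `col` and `rotation` after going left as much as possible.
--     """
--     shift = min(rotation, col - ring)
--     col -= shift
--     rotation -= shift
--     return col, rotation
--
-- def go_right(rotation: int, col: int, cols_count: int, ring: int) -> tuple[int, int]:
--     """
--     Update `col` and `rotation` after going right as much as possible.
--     """
--     shift = min(rotation, cols_count - 1 - ring - col)
--     col += shift
--     rotation -= shift
--     return col, rotation
--
-- def go_up(rotation: int, row: int, ring: int) -> tuple[int, int]:
--     """
--     Update `row` and `rotation` after going up as much as possible.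
--     """
--     shift = min(rotation, row - ring)
--     row -= shift
--     rotation -= shift
--     return row, rotation
--
-- def go_down(rotation: int, row: int, rows_count: int, ring: int) -> tuple[int, int]:
--     """
--     Update `row` and `rotation` after going down as much as possible.
--     """
--     shift = min(rotation, rows_count - 1 - ring - row)
--     row += shift
--     rotation -= shift
--     return row, rotation
--
-- def compute_old_position(
--     rows_count: int, cols_count: int, rotation: int, row: int, col: int
-- ) -> tuple[int, int]:
--     """
--     Compute the old position of the given `row`/`col` pair before an
--     anti-clockwise rotation. This is achieved by rotating clockwise the pair.
--     """
--     ring = compute_ring(rows_count, cols_count, row, col)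
--     ring_size = compute_ring_size(rows_count, cols_count, ring)
--     # A rotation which is an exact multiple of ring_size has no effect on the
--     # matrix
--     rotation = rotation % ring_size
--
--     # Until there's still some budget for rotation:
--     # - choose a direction
--     # - follow the direction as much as possible
--     # - update row/col and rotation
--     while rotation > 0:
--         if row == ring:
--             if col == cols_count - 1 - ring:
--                 row, rotation = go_down(
--                     rotation=rotation, row=row, rows_count=rows_count, ring=ring
--                 )
--             else:
--                 col, rotation = go_right(
--                     rotation=rotation, col=col, cols_count=cols_count, ring=ring
--                 )
--         elif row == rows_count - 1 - ring:
--             if col == ring: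
--                 row, rotation = go_up(rotation=rotation, row=row, ring=ring)
--             else:
--                 col, rotation = go_left(rotation=rotation, col=col, ring=ring)
--         elif col == ring:
--             row, rotation = go_up(rotation=rotation, row=row, ring=ring)
--         elif col == cols_count - 1 - ring:
--             row, rotation = go_down(
--                 rotation=rotation, row=row, rows_count=rows_count, ring=ring
--             )
--         else:
--             raise ValueError(f"Unexpected coordinates for {ring=}: {row=}, {col=}")
--
--     assert rotation == 0, rotation
--     return row, col
-- ===== SOURCE B (Python) =====
-- def _ring_index(ring, w, h, row, col):
--     """Clockwise index (0 at the top-left corner) of a cell on its ring."""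
--     if row == ring:
--         return col - ring
--     if col == ring + w - 1:
--         return (w - 1) + (row - ring)
--     if row == ring + h - 1:
--         return (w - 1) + (h - 1) + (ring + w - 1 - col)
--     return 2 * (w - 1) + (h - 1) + (ring + h - 1 - row)
--
-- def _ring_cell(ring, w, h, j):
--     """Cell at clockwise index j (0 <= j < 2*w + 2*h - 4) on the ring."""
--     if j < w:
--         return ring, ring + j
--     if j < (w - 1) + h:
--         return ring + (j - (w - 1)), ring + w - 1
--     if j < 2 * (w - 1) + h:
--         return ring + h - 1, ring + w - 1 - (j - (w - 1) - (h - 1))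
--     return ring + h - 1 - (j - (2 * (w - 1) + (h - 1))), ring
--
-- def compute_old_position(rows_count, cols_count, rotation, row, col):
--     ring = min(row, col, rows_count - 1 - row, cols_count - 1 - col)
--     if rows_count == 1:
--         ring_size = cols_count
--     elif cols_count == 1:
--         ring_size = rows_count
--     else:
--         ring_size = (rows_count - 2 * ring) * 2 + (cols_count - 2 * ring - 2) * 2
--     w = cols_count - 2 * ring
--     h = rows_count - 2 * ring
--     j = (_ring_index(ring, w, h, row, col) + rotation) % ring_size
--     return _ring_cell(ring, w, h, j)
-- ===== Notes on version B (the rewrite author's own statement) =====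
-- stated objective: alternative
-- what changed: A undoes the rotation by walking the cell clockwise around its ring edge by edge in a while-loop; B assigns the cell a closed-form clockwise perimeter index, adds the rotation modulo the ring size, and maps the index back to coordinates by piecewise arithmetic, with no loop (constant-time arithmetic, though a timing run could not measure a difference at the tested sizes).
-- outside the precondition, e.g. on compute_old_position(5, 3, 1, 2, 1): A returns (1, 1), B returns (3, 1); on compute_old_position(1, 5, 1, 0, 0): A returns (0, 1), B returns (0, 1)
import Mathlib
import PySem

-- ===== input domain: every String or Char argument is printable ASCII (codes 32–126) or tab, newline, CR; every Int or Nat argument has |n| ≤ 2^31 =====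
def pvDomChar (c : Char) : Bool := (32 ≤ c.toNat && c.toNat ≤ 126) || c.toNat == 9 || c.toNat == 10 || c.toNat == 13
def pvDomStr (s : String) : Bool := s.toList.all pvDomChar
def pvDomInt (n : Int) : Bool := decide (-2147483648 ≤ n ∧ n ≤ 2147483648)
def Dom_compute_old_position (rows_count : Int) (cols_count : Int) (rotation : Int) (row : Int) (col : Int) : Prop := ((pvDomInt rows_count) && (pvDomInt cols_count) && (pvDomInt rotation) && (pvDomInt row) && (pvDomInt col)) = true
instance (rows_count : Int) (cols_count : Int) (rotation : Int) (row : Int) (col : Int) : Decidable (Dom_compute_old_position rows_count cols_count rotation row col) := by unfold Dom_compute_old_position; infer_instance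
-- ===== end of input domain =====

-- B replaces A's step-by-step clockwise walk around the ring by closed-form perimeter
-- indexing: index the cell, add the rotation modulo the ring size, map the index back —
-- piecewise arithmetic with no loop.

-- ===== PORT A =====
def compute_ring (rows_count : Int) (cols_count : Int) (row : Int) (col : Int) : Int :=
  min (min (min row col) (rows_count - 1 - row)) (cols_count - 1 - col)

def compute_ring_size (rows_count : Int) (cols_count : Int) (ring : Int) : Int :=
  if rows_count = 1 then cols_count
  else if cols_count = 1 then rows_count
  else (rows_count - 2 * ring) * 2 + (cols_count - 2 * ring - 2) * 2

def go_left (rotation : Int) (col : Int) (ring : Int) : Int × Int :=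
  let shift := min rotation (col - ring)
  (col - shift, rotation - shift)

def go_right (rotation : Int) (col : Int) (cols_count : Int) (ring : Int) : Int × Int :=
  let shift := min rotation (cols_count - 1 - ring - col)
  (col + shift, rotation - shift)

def go_up (rotation : Int) (row : Int) (ring : Int) : Int × Int :=
  let shift := min rotation (row - ring)
  (row - shift, rotation - shift)

def go_down (rotation : Int) (row : Int) (rows_count : Int) (ring : Int) : Int × Int :=
  let shift := min rotation (rows_count - 1 - ring - row)
  (row + shift, rotation - shift)

-- A's `while rotation > 0` loop; fuel only makes the recursion total (under
-- Pre_ each iteration decreases rotation by at least 1, so the fuel suffices).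
def pvALoop (rows_count : Int) (cols_count : Int) (ring : Int) : Nat → Int → Int → Int → Int × Int
  | 0, _, row, col => (row, col)
  | fuel + 1, rotation, row, col =>
    if rotation > 0 then
      if row = ring then
        if col = cols_count - 1 - ring then
          let p := go_down rotation row rows_count ring
          pvALoop rows_count cols_count ring fuel p.2 p.1 col
        else
          let p := go_right rotation col cols_count ring
          pvALoop rows_count cols_count ring fuel p.2 row p.1
      else if row = rows_count - 1 - ring then
        if col = ring then
          let p := go_up rotation row ring
          pvALoop rows_count cols_count ring fuel p.2 p.1 col
        else
          let p := go_left rotation col ring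
          pvALoop rows_count cols_count ring fuel p.2 row p.1
      else if col = ring then
        let p := go_up rotation row ring
        pvALoop rows_count cols_count ring fuel p.2 p.1 col
      else if col = cols_count - 1 - ring then
        let p := go_down rotation row rows_count ring
        pvALoop rows_count cols_count ring fuel p.2 p.1 col
      else
        (row, col)  -- Python raises ValueError here; unreachable under Pre_
    else (row, col)

def compute_old_position (rows_count : Int) (cols_count : Int) (rotation : Int) (row : Int) (col : Int) : Int × Int :=
  let ring := compute_ring rows_count cols_count row col
  let ring_size := compute_ring_size rows_count cols_count ring
  let rotation' := PySem.Int.mod rotation ring_size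
  pvALoop rows_count cols_count ring rotation'.toNat rotation' row col

-- ===== PORT B =====
def ring_index (ring : Int) (w : Int) (h : Int) (row : Int) (col : Int) : Int :=
  if row = ring then col - ring
  else if col = ring + w - 1 then (w - 1) + (row - ring)
  else if row = ring + h - 1 then (w - 1) + (h - 1) + (ring + w - 1 - col)
  else 2 * (w - 1) + (h - 1) + (ring + h - 1 - row)

def ring_cell (ring : Int) (w : Int) (h : Int) (j : Int) : Int × Int :=
  if j < w then (ring, ring + j)
  else if j < (w - 1) + h then (ring + (j - (w - 1)), ring + w - 1)
  else if j < 2 * (w - 1) + h then (ring + h - 1, ring + w - 1 - (j - (w - 1) - (h - 1)))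
  else (ring + h - 1 - (j - (2 * (w - 1) + (h - 1))), ring)

def compute_old_position_alt (rows_count : Int) (cols_count : Int) (rotation : Int) (row : Int) (col : Int) : Int × Int :=
  let ring := min (min (min row col) (rows_count - 1 - row)) (cols_count - 1 - col)
  let ring_size :=
    if rows_count = 1 then cols_count
    else if cols_count = 1 then rows_count
    else (rows_count - 2 * ring) * 2 + (cols_count - 2 * ring - 2) * 2
  let w := cols_count - 2 * ring
  let h := rows_count - 2 * ring
  let j := PySem.Int.mod (ring_index ring w h row col + rotation) ring_size
  ring_cell ring w h j

-- ===== PRECONDITION & SPEC =====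
-- Pre_ excludes cells whose ring degenerates to a line or a point (ring width or
-- height < 2): there A raises ZeroDivisionError (1×1 ring) or infinite-loops for most
-- rotations, and where it does return, the stuck-walk value is an accident; it also
-- excludes the rows_count = 1 / cols_count = 1 special cases, where ring_size is not
-- the ring perimeter and A's value on such (necessarily out-of-range) cells with a
-- non-degenerate ring is an artefact of the walk.
def Pre_compute_old_position (rows_count : Int) (cols_count : Int) (rotation : Int) (row : Int) (col : Int) : Prop :=
  rows_count ≠ 1 ∧ cols_count ≠ 1 ∧
  2 ≤ rows_count - 2 * (min (min (min row col) (rows_count - 1 - row)) (cols_count - 1 - col)) ∧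
  2 ≤ cols_count - 2 * (min (min (min row col) (rows_count - 1 - row)) (cols_count - 1 - col))
instance (rows_count : Int) (cols_count : Int) (rotation : Int) (row : Int) (col : Int) : Decidable (Pre_compute_old_position rows_count cols_count rotation row col) := by unfold Pre_compute_old_position; infer_instance

def pvWitness_compute_old_position : Int × Int × Int × Int × Int := (4, 4, 3, 0, 2)

def Spec_compute_old_position (rows_count : Int) (cols_count : Int) (rotation : Int) (row : Int) (col : Int) (out : Int × Int) : Prop := out = compute_old_position_alt rows_count cols_count rotation row col
instance (rows_count : Int) (cols_count : Int) (rotation : Int) (row : Int) (col : Int) (out : Int × Int) : Decidable (Spec_compute_old_position rows_count cols_count rotation row col out) := by unfold Spec_compute_old_position; infer_instance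

-- ===== CLAIM (what is proved, stated in full; the proofs are below) =====
def Claim_equal_compute_old_position : Prop := ∀ (rows_count : Int) (cols_count : Int) (rotation : Int) (row : Int) (col : Int), Dom_compute_old_position rows_count cols_count rotation row col → Pre_compute_old_position rows_count cols_count rotation row col → Spec_compute_old_position rows_count cols_count rotation row col (compute_old_position rows_count cols_count rotation row col)

-- ===== LEMMAS AND PROOFS =====

-- the clockwise index of an on-ring cell lies in [0, perimeter)
lemma ring_index_bounds (g w h row col : Int) (hw : 2 ≤ w) (hh : 2 ≤ h)
    (h1 : g ≤ row) (h2 : row ≤ g + h - 1) (h3 : g ≤ col) (h4 : col ≤ g + w - 1) :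
    0 ≤ ring_index g w h row col ∧ ring_index g w h row col < 2 * w + 2 * h - 4 := by
  unfold ring_index; split_ifs <;> constructor <;> omega

-- ring_cell inverts ring_index on on-ring cells
lemma ring_cell_index (g w h row col : Int) (hw : 2 ≤ w) (hh : 2 ≤ h)
    (h1 : g ≤ row) (h2 : row ≤ g + h - 1) (h3 : g ≤ col) (h4 : col ≤ g + w - 1)
    (hedge : row = g ∨ row = g + h - 1 ∨ col = g ∨ col = g + w - 1) :
    ring_cell g w h (ring_index g w h row col) = (row, col) := by
  unfold ring_cell ring_index
  split_ifs <;> simp only [Prod.mk.injEq] <;> constructor <;> omega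

-- the loop equals the closed form: walking `rot` clockwise steps from an on-ring
-- cell lands on perimeter index (index + rot), reduced once past the perimeter
lemma aloop_eq (rows cols g : Int) (hW : 2 ≤ cols - 2 * g) (hH : 2 ≤ rows - 2 * g) :
    ∀ (fuel : Nat) (rot row col : Int),
      0 ≤ rot → rot ≤ (fuel : Int) → rot < 2 * (cols - 2 * g) + 2 * (rows - 2 * g) - 4 →
      g ≤ row → row ≤ rows - 1 - g → g ≤ col → col ≤ cols - 1 - g →
      (row = g ∨ row = rows - 1 - g ∨ col = g ∨ col = cols - 1 - g) →
      pvALoop rows cols g fuel rot row col =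
        ring_cell g (cols - 2 * g) (rows - 2 * g)
          (if ring_index g (cols - 2 * g) (rows - 2 * g) row col + rot
                < 2 * (cols - 2 * g) + 2 * (rows - 2 * g) - 4
           then ring_index g (cols - 2 * g) (rows - 2 * g) row col + rot
           else ring_index g (cols - 2 * g) (rows - 2 * g) row col + rot
                - (2 * (cols - 2 * g) + 2 * (rows - 2 * g) - 4)) := by
  intro fuel
  induction fuel with
  | zero =>
    intro rot row col hr0 hrf hrP hb1 hb2 hb3 hb4 hedge
    have hrot : rot = 0 := by omega
    subst hrot
    have hidx := ring_index_bounds g (cols - 2*g) (rows - 2*g) row col hW hH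
      (by omega) (by omega) (by omega) (by omega)
    rw [pvALoop, if_pos (by omega), add_zero, ring_cell_index g (cols - 2*g) (rows - 2*g) row col hW hH
      (by omega) (by omega) (by omega) (by omega) (by omega)]
  | succ fuel ih =>
    intro rot row col hr0 hrf hrP hb1 hb2 hb3 hb4 hedge
    by_cases hrot : rot > 0
    · rw [pvALoop, if_pos hrot]
      by_cases hA : row = g
      · by_cases hB : col = cols - 1 - g
        · -- top-right corner: go_down
          rw [if_pos hA, if_pos hB]
          simp only [go_down]
          rw [ih (rot - min rot (rows - 1 - g - row)) (row + min rot (rows - 1 - g - row)) col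
            (by omega) (by omega) (by omega) (by omega) (by omega) (by omega) (by omega) (by omega)]
          congr 1
          simp only [ring_index]; split_ifs <;> omega
        · -- top edge: go_right
          rw [if_pos hA, if_neg hB]
          simp only [go_right]
          rw [ih (rot - min rot (cols - 1 - g - col)) row (col + min rot (cols - 1 - g - col))
            (by omega) (by omega) (by omega) (by omega) (by omega) (by omega) (by omega) (by omega)]
          congr 1
          simp only [ring_index]; split_ifs <;> omega
      · by_cases hC : row = rows - 1 - g
        · by_cases hD : col = g
          · -- bottom-left corner: go_up
            rw [if_neg hA, if_pos hC, if_pos hD]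
            simp only [go_up]
            rw [ih (rot - min rot (row - g)) (row - min rot (row - g)) col
              (by omega) (by omega) (by omega) (by omega) (by omega) (by omega) (by omega) (by omega)]
            congr 1
            simp only [ring_index]; split_ifs <;> omega
          · -- bottom edge: go_left
            rw [if_neg hA, if_pos hC, if_neg hD]
            simp only [go_left]
            rw [ih (rot - min rot (col - g)) row (col - min rot (col - g))
              (by omega) (by omega) (by omega) (by omega) (by omega) (by omega) (by omega) (by omega)]
            congr 1
            simp only [ring_index]; split_ifs <;> omega
        · by_cases hD : col = g
          · -- left edge: go_up
            rw [if_neg hA, if_neg hC, if_pos hD]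
            simp only [go_up]
            rw [ih (rot - min rot (row - g)) (row - min rot (row - g)) col
              (by omega) (by omega) (by omega) (by omega) (by omega) (by omega) (by omega) (by omega)]
            congr 1
            simp only [ring_index]; split_ifs <;> omega
          · -- right edge: go_down
            have hE : col = cols - 1 - g := by omega
            rw [if_neg hA, if_neg hC, if_neg hD, if_pos hE]
            simp only [go_down]
            rw [ih (rot - min rot (rows - 1 - g - row)) (row + min rot (rows - 1 - g - row)) col
              (by omega) (by omega) (by omega) (by omega) (by omega) (by omega) (by omega) (by omega)]
            congr 1
            simp only [ring_index]; split_ifs <;> omega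
    · have hrot0 : rot = 0 := by omega
      subst hrot0
      have hidx := ring_index_bounds g (cols - 2*g) (rows - 2*g) row col hW hH
        (by omega) (by omega) (by omega) (by omega)
      rw [pvALoop, if_neg (by omega), if_pos (by omega), add_zero,
        ring_cell_index g (cols - 2*g) (rows - 2*g) row col hW hH
        (by omega) (by omega) (by omega) (by omega) (by omega)]

-- reduce a sum idx + rotation modulo the perimeter in the shape the loop lemma uses
lemma emod_reduce (idx rotation P : Int) (hP : 0 < P) (h0 : 0 ≤ idx) (h1 : idx < P) :
    (idx + rotation) % P =
      if idx + rotation % P < P then idx + rotation % P else idx + rotation % P - P := by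
  have hx0 : 0 ≤ rotation % P := Int.emod_nonneg rotation (by omega)
  have hx1 : rotation % P < P := Int.emod_lt_of_pos rotation hP
  have hsplit : (idx + rotation) % P = (idx + rotation % P) % P := by
    conv_lhs => rw [Int.add_emod, Int.emod_eq_of_lt h0 h1]
  rw [hsplit]
  split_ifs with hlt
  · exact Int.emod_eq_of_lt (by omega) hlt
  · rw [← Int.sub_emod_right (idx + rotation % P) P]
    exact Int.emod_eq_of_lt (by omega) (by omega)

-- ===== VERDICT (by name: the statement is the Claim_ definition above) =====
theorem compute_old_position_spec : Claim_equal_compute_old_position := by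
  intro rows cols rotation row col _hdom hpre
  obtain ⟨hrows1, hcols1, hH, hW⟩ := hpre
  simp only [Spec_compute_old_position, compute_old_position, compute_old_position_alt,
    compute_ring, compute_ring_size]
  set g := min (min (min row col) (rows - 1 - row)) (cols - 1 - col) with hg
  have hgrow : g ≤ row ∧ row ≤ rows - 1 - g := by omega
  have hgcol : g ≤ col ∧ col ≤ cols - 1 - g := by omega
  have hedge : row = g ∨ row = rows - 1 - g ∨ col = g ∨ col = cols - 1 - g := by omega
  rw [if_neg hrows1, if_neg hcols1]
  set P := (rows - 2 * g) * 2 + (cols - 2 * g - 2) * 2 with hPdef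
  have hPpos : 0 < P := by omega
  have hmodeq : PySem.Int.mod rotation P = rotation % P :=
    PySem.Int.mod_eq_emod_of_pos hPpos
  rw [hmodeq]
  have hrot0 : 0 ≤ rotation % P := Int.emod_nonneg rotation (by omega)
  have hrot1 : rotation % P < P := Int.emod_lt_of_pos rotation hPpos
  have hfuel : rotation % P ≤ (((rotation % P).toNat : Nat) : Int) := Int.self_le_toNat _
  have hidx := ring_index_bounds g (cols - 2*g) (rows - 2*g) row col hW hH
    (by omega) (by omega) (by omega) (by omega)
  rw [aloop_eq rows cols g hW hH _ _ row col hrot0 hfuel (by omega)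
    hgrow.1 hgrow.2 hgcol.1 hgcol.2 hedge]
  rw [PySem.Int.mod_eq_emod_of_pos hPpos,
    emod_reduce (ring_index g (cols - 2*g) (rows - 2*g) row col) rotation P hPpos
      hidx.1 (by omega)]
  congr 1
  split_ifs <;> omega
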